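-- pv_equiv track=rewrite | github.com/Arya-A-Nair/TY | INS/playground/transpose.py | makeMatrixx
-- ===== SOURCE A (Python) =====
-- def makeMatrixx(plainText, key):
--    plainText = plainText.replace(' ', '')
--    matrix = []
--    row = []
--    count = 0
--    for char in plainText:
--        row.append(char)
--        count += 1
--        if count % len(key) == 0:
--            matrix.append(row)
--            row = []
--    if len(plainText) % len(key) != 0:
--        while len(row) != len(key):
--            row.append('X')
--        matrix.append(row)
--    return matrix
-- ===== SOURCE B (Python) =====
-- def makeMatrixx(plainText, key):
--     text = plainText.replace(' ', '')
--     k = len(key)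
--     rem = len(text) % k
--     matrix = [list(text[i:i + k]) for i in range(0, len(text), k)]
--     if rem != 0:
--         matrix[-1].extend('X' * (k - rem))
--     return matrix
-- ===== Notes on version B (the rewrite author's own statement) =====
-- stated objective: faster
-- what changed: Replaces the per-character counter loop plus while-append padding with stride-slice chunking (one C-level slice per row) and arithmetic padding of the last row.
import Mathlib
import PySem

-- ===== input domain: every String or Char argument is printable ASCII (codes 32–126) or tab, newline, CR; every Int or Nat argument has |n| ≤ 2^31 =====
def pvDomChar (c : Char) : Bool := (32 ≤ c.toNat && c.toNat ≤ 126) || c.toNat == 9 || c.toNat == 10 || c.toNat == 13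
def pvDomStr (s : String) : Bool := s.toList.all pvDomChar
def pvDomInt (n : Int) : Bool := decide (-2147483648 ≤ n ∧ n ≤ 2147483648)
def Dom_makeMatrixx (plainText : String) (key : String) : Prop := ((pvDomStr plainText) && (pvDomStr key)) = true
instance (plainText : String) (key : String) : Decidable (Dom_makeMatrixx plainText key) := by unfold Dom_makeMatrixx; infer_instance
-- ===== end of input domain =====

-- B replaces A's per-character counter loop and while-append padding by stride-slice
-- chunking with arithmetic padding of the last row (measured faster in a timing run).


-- ===== PORT A =====
-- the 'while len(row) != len(key): row.append("X")' loop; exact on the reachable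
-- states (row shorter than key — Python diverges when the row is longer, which never occurs)
def padRowA (k : Nat) (r : List String) : List String :=
  if _h : r.length < k then padRowA k (r ++ ["X"]) else r
  termination_by k - r.length
  decreasing_by simp_all; omega

def makeMatrixx (plainText : String) (key : String) : List (List String) :=
  let text := PySem.Str.replace plainText " " ""
  let st := text.toList.foldl
    (fun (st : List (List String) × List String × Int) ch =>
      let r := st.2.1 ++ [String.ofList [ch]]
      let c := st.2.2 + 1
      if PySem.Int.mod c (PySem.Str.len key) = 0 then (st.1 ++ [r], [], c) else (st.1, r, c))
    ([], [], 0)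
  if PySem.Int.mod (PySem.Str.len text) (PySem.Str.len key) ≠ 0 then
    st.1 ++ [padRowA (PySem.Str.len key).toNat st.2.1]
  else st.1

-- ===== PORT B =====
def makeMatrixx_alt (plainText : String) (key : String) : List (List String) :=
  let text := PySem.Str.replace plainText " " ""
  let k := PySem.Str.len key
  let rem := PySem.Int.mod (PySem.Str.len text) k
  let matrix := (PySem.List.pyRange 0 (PySem.Str.len text) k).map
      (fun i => (PySem.List.slice text.toList (some i) (some (i + k))).map (fun c => String.ofList [c]))
  if rem ≠ 0 then
    -- matrix[-1].extend('X' * (k - rem)): replace the last row (nonempty list since rem ≠ 0)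
    matrix.dropLast ++ [matrix.getLastD [] ++ List.replicate (k - rem).toNat "X"]
  else matrix

-- ===== PRECONDITION & SPEC =====
-- A raises ZeroDivisionError when key is empty (len(key) is 0 in 'count % len(key)'); B raises there too.
def Pre_makeMatrixx (plainText : String) (key : String) : Prop := key ≠ ""
instance (plainText : String) (key : String) : Decidable (Pre_makeMatrixx plainText key) := by unfold Pre_makeMatrixx; infer_instance
def pvWitness_makeMatrixx : String × String := ("attack at dawn", "abc")
def Spec_makeMatrixx (plainText : String) (key : String) (out : List (List String)) : Prop := out = makeMatrixx_alt plainText key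
instance (plainText : String) (key : String) (out : List (List String)) : Decidable (Spec_makeMatrixx plainText key out) := by unfold Spec_makeMatrixx; infer_instance

-- ===== CLAIM (what is proved, stated in full; the proofs are below) =====
def Claim_equal_makeMatrixx : Prop := ∀ (plainText : String) (key : String), Dom_makeMatrixx plainText key → Pre_makeMatrixx plainText key → Spec_makeMatrixx plainText key (makeMatrixx plainText key)

-- ===== LEMMAS AND PROOFS =====

-- single-character string, as both ports build it
def mk1 (c : Char) : String := String.ofList [c]

-- proof-side model of A's accumulating loop: full rows so far, and the pending row
def chA (k : Nat) : List Char → List String → (List (List String) × List String)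
  | [], r => ([], r)
  | ch :: cs, r =>
      let r' := r ++ [mk1 ch]
      if r'.length = k then (r' :: (chA k cs []).1, (chA k cs []).2) else chA k cs r'

-- proof-side model of B's matrix: k-chunks of cs (last one possibly short)
def chB (k : Nat) (cs : List Char) : List (List String) :=
  if _h : cs = [] ∨ k = 0 then [] else ((cs.take k).map mk1) :: chB k (cs.drop k)
  termination_by cs.length
  decreasing_by
    push_neg at _h
    cases cs with
    | nil => exact absurd rfl _h.1
    | cons a l => simp; omega

lemma chB_nil (k : Nat) : chB k [] = [] := by rw [chB]; simp

lemma chB_cons (k : Nat) (hk : 0 < k) (cs : List Char) (hne : cs ≠ []) :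
    chB k cs = ((cs.take k).map mk1) :: chB k (cs.drop k) := by
  rw [chB]; simp [hne, Nat.pos_iff_ne_zero.mp hk]

lemma padRowA_eq (k : Nat) : ∀ (d : Nat) (r : List String), k - r.length = d → r.length ≤ k →
    padRowA k r = r ++ List.replicate d "X" := by
  intro d
  induction d with
  | zero =>
      intro r hd _
      rw [padRowA]
      have h : ¬ r.length < k := by omega
      simp [h]
  | succ n ih =>
      intro r hd _
      rw [padRowA]
      have h : r.length < k := by omega
      rw [dif_pos h, ih (r ++ ["X"]) (by simp; omega) (by simp; omega)]
      simp [List.replicate_succ]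

lemma chA_small (k : Nat) : ∀ (cs : List Char) (r : List String), r.length + cs.length < k →
    chA k cs r = ([], r ++ cs.map mk1) := by
  intro cs
  induction cs with
  | nil => intro r _; simp [chA]
  | cons ch cs ih =>
      intro r h
      simp only [chA]
      have hne : ¬ (r ++ [mk1 ch]).length = k := by simp at h ⊢; omega
      rw [if_neg hne, ih (r ++ [mk1 ch]) (by simp at h ⊢; omega)]
      simp

lemma chA_big (k : Nat) (hk : 0 < k) : ∀ (cs : List Char) (r : List String),
    r.length < k → k ≤ r.length + cs.length →
    chA k cs r = ((r ++ (cs.take (k - r.length)).map mk1) :: (chA k (cs.drop (k - r.length)) []).1,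
                  (chA k (cs.drop (k - r.length)) []).2) := by
  intro cs
  induction cs with
  | nil => intro r h1 h2; simp at h2; omega
  | cons ch cs ih =>
      intro r h1 h2
      simp only [chA]
      by_cases he : (r ++ [mk1 ch]).length = k
      · rw [if_pos he]
        simp at he
        have htake : k - r.length = 1 := by omega
        simp [htake]
      · rw [if_neg he]
        simp at he
        have h1' : (r ++ [mk1 ch]).length < k := by simp; omega
        rw [ih (r ++ [mk1 ch]) h1' (by simp at h2 ⊢; omega)]
        have htake : k - r.length = (k - (r.length + 1)) + 1 := by omega
        simp [htake, List.take_succ_cons, List.drop_succ_cons]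

-- A's character loop computes chA
lemma foldA (k : Nat) (hk : 0 < k) : ∀ (cs : List Char) (r : List String) (m : List (List String)) (c : Int),
    c % (k : Int) = r.length → r.length < k →
    cs.foldl
      (fun (st : List (List String) × List String × Int) ch =>
        if PySem.Int.mod (st.2.2 + 1) ((k : Nat) : Int) = 0 then
          (st.1 ++ [st.2.1 ++ [String.ofList [ch]]], [], st.2.2 + 1)
        else (st.1, st.2.1 ++ [String.ofList [ch]], st.2.2 + 1))
      (m, r, c)
    = (m ++ (chA k cs r).1, (chA k cs r).2, c + cs.length) := by
  intro cs
  induction cs with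
  | nil => intro r m c _ _; simp [chA]
  | cons ch cs ih =>
      intro r m c hc hr
      have hkpos : (0 : Int) < (k : Int) := by exact_mod_cast hk
      have hmod1 : (c + 1) % (k : Int) = ((r.length : Int) + 1) % (k : Int) := by
        conv_lhs => rw [← Int.ediv_add_emod c (k : Int)]
        rw [hc]
        ring_nf
        rw [Int.add_right_comm]
        exact Int.add_mul_emod_self_left _ _ _
      simp only [PySem.Int.mod_eq_emod_of_pos hkpos] at ih ⊢
      simp only [List.foldl_cons]
      by_cases hfull : r.length + 1 = k
      · have hc0 : (c + 1) % (k : Int) = 0 := by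
          rw [hmod1]
          have hcast : ((r.length : Int) + 1) = (k : Int) := by exact_mod_cast hfull
          rw [hcast, Int.emod_self]
        rw [if_pos hc0]
        simp only [chA, mk1]
        have hlen : (r ++ [String.ofList [ch]]).length = k := by simp; omega
        rw [if_pos hlen]
        rw [ih [] (m ++ [r ++ [String.ofList [ch]]]) (c + 1) (by simpa using hc0) hk]
        simp; omega
      · have hklt : ((r.length : Int) + 1) < (k : Int) := by exact_mod_cast (show r.length + 1 < k by omega)
        have hsmall : ((r.length : Int) + 1) % (k : Int) = (r.length : Int) + 1 :=
          Int.emod_eq_of_lt (by omega) hklt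
        have hcne : ¬ (c + 1) % (k : Int) = 0 := by rw [hmod1, hsmall]; omega
        rw [if_neg hcne]
        simp only [chA, mk1]
        have hlen : ¬ (r ++ [String.ofList [ch]]).length = k := by simp; omega
        rw [if_neg hlen]
        rw [ih (r ++ [String.ofList [ch]]) m (c + 1) (by rw [hmod1, hsmall]; simp) (by simp; omega)]
        simp; omega

lemma foldA' (key : String) (hk : 0 < key.toList.length) (cs : List Char) :
    cs.foldl
      (fun (st : List (List String) × List String × Int) ch =>
        if PySem.Int.mod (st.2.2 + 1) (PySem.Str.len key) = 0 then
          (st.1 ++ [st.2.1 ++ [String.ofList [ch]]], [], st.2.2 + 1)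
        else (st.1, st.2.1 ++ [String.ofList [ch]], st.2.2 + 1))
      ([], [], 0)
    = ((chA key.toList.length cs []).1, (chA key.toList.length cs []).2, (0 : Int) + cs.length) := by
  rw [PySem.Str.len_eq key]
  rw [foldA key.toList.length hk cs [] [] 0 (by simp) hk]
  simp

-- B's range/slice comprehension computes chB
lemma range_chunks (k : Nat) (hk : 0 < k) : ∀ (m : Nat) (cs : List Char), (cs.length + k - 1) / k = m →
    (List.range m).map (fun j => ((cs.drop (k * j)).take k).map mk1) = chB k cs := by
  intro m
  induction m with
  | zero =>
      intro cs h
      rcases (Nat.div_eq_zero_iff).mp h with h' | h'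
      · omega
      · have h0 : cs.length = 0 := by omega
        rw [List.length_eq_zero_iff.mp h0, chB_nil]
        simp
  | succ m ih =>
      intro cs h
      have hne : cs ≠ [] := by
        rintro rfl
        rw [show ([] : List Char).length + k - 1 = k - 1 by simp, Nat.div_eq_of_lt (by omega)] at h
        omega
      have h1 : 1 ≤ cs.length := by
        cases cs with
        | nil => exact absurd rfl hne
        | cons a l => simp
      have hdiv : ((cs.drop k).length + k - 1) / k = m := by
        rw [List.length_drop]
        by_cases hge : k ≤ cs.length
        · have e2 : cs.length + k - 1 = (cs.length - 1) + k := by omega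
          rw [e2, Nat.add_div_right _ hk] at h
          rw [show cs.length - k + k - 1 = cs.length - 1 by omega]
          omega
        · have hone : (cs.length + k - 1) / k = 1 :=
            Nat.div_eq_of_lt_le (by omega) (by omega)
          rw [hone] at h
          rw [show cs.length - k = 0 by omega, Nat.zero_add, Nat.div_eq_of_lt (by omega)]
          omega
      rw [chB_cons k hk cs hne, List.range_succ_eq_map, List.map_cons, List.map_map]
      refine congrArg₂ List.cons (by simp) ?_
      rw [← ih (cs.drop k) hdiv]
      apply List.map_congr_left
      intro j _
      simp only [Function.comp_apply, List.drop_drop]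
      rw [show k * Nat.succ j = k + k * j by rw [Nat.mul_succ, Nat.add_comm], Nat.add_comm]

lemma B_matrix (k : Nat) (hk : 0 < k) (cs : List Char) :
    (PySem.List.pyRange 0 (cs.length : Int) (k : Int)).map
      (fun i => (PySem.List.slice cs (some i) (some (i + (k : Int)))).map (fun c => String.ofList [c]))
    = chB k cs := by
  rw [PySem.List.pyRange_of_pos _ _ (by exact_mod_cast hk), List.map_map]
  have hM : (if (0 : Int) < (cs.length : Int) then
      (((cs.length : Int) - 0 + (k : Int) - 1) / (k : Int)).toNat else 0) = (cs.length + k - 1) / k := by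
    by_cases h0 : 0 < cs.length
    · rw [if_pos (by exact_mod_cast h0)]
      rw [show ((cs.length : Int) - 0 + (k : Int) - 1) = ((cs.length + k - 1 : Nat) : Int) by push_cast; omega]
      norm_cast
    · rw [if_neg (by omega)]
      rw [show cs.length = 0 by omega]
      rw [Nat.zero_add, Nat.div_eq_of_lt (by omega)]
  rw [hM, ← range_chunks k hk _ cs rfl]
  apply List.map_congr_left
  intro j _
  simp only [Function.comp_apply]
  rw [show (0 : Int) + (k : Int) * (j : Int) = ((k * j : Nat) : Int) by push_cast; ring]
  rw [show ((k * j : Nat) : Int) + (k : Int) = ((k * j : Nat) : Int) + ((k : Nat) : Int) by norm_cast]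
  rw [PySem.List.slice_natCast_add cs (k * j) k]
  rfl

-- assembling: A's final matrix equals B's final matrix, on the list of characters
lemma getLastD_cons_ne_nil {α : Type} (a d : α) (l : List α) (h : l ≠ []) :
    (a :: l).getLastD d = l.getLastD d := by
  cases l with
  | nil => exact absurd rfl h
  | cons b t => simp [List.getLastD_cons]

lemma chB_ne_nil (k : Nat) (hk : 0 < k) (cs : List Char) (hne : cs ≠ []) : chB k cs ≠ [] := by
  rw [chB_cons k hk cs hne]; simp

lemma assemble (k : Nat) (hk : 0 < k) : ∀ (n : Nat) (cs : List Char), cs.length = n →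
    (if cs.length % k ≠ 0 then (chA k cs []).1 ++ [padRowA k (chA k cs []).2] else (chA k cs []).1)
    = (if cs.length % k ≠ 0 then
         (chB k cs).dropLast ++ [(chB k cs).getLastD [] ++ List.replicate (k - cs.length % k) "X"]
       else chB k cs) := by
  intro n
  induction n using Nat.strong_induction_on with
  | _ n ih =>
    intro cs hlen
    by_cases hbig : k ≤ cs.length
    · have hne : cs ≠ [] := by rintro rfl; simp at hbig; omega
      have hA := chA_big k hk cs [] (by simpa using hk) (by simpa using hbig)
      simp only [List.nil_append, List.length_nil, Nat.sub_zero] at hA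
      have hB := chB_cons k hk cs hne
      have hmod : cs.length % k = (cs.drop k).length % k := by
        rw [List.length_drop]; exact Nat.mod_eq_sub_mod hbig
      have hrec := ih (cs.drop k).length (by rw [List.length_drop]; omega) (cs.drop k) rfl
      rw [hA, hB, hmod]
      by_cases hz : (cs.drop k).length % k = 0
      · simp only [hz, ne_eq, not_true_eq_false, if_false, reduceIte] at hrec ⊢
        rw [hrec]
      · have hdropne : cs.drop k ≠ [] := by
          intro hd
          rw [hd] at hz; simp at hz
        have hBne : chB k (cs.drop k) ≠ [] := chB_ne_nil k hk _ hdropne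
        simp only [hz, ne_eq, not_false_eq_true, if_true, reduceIte] at hrec ⊢
        rw [List.dropLast_cons_of_ne_nil hBne, getLastD_cons_ne_nil _ _ _ hBne]
        simp only [List.cons_append]
        rw [hrec]
    · by_cases hnil : cs = []
      · subst hnil; simp [chA, chB_nil]
      · have h1 : 1 ≤ cs.length := by
          cases cs with
          | nil => exact absurd rfl hnil
          | cons a l => simp
        have hlt : cs.length < k := by omega
        have hA := chA_small k cs [] (by simpa using hlt)
        have hmodeq : cs.length % k = cs.length := Nat.mod_eq_of_lt hlt
        have hz : cs.length % k ≠ 0 := by omega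
        have hB : chB k cs = [(cs.map mk1)] := by
          rw [chB_cons k hk cs hnil, List.take_of_length_le (le_of_lt hlt),
              List.drop_eq_nil_of_le (le_of_lt hlt), chB_nil]
        rw [hA, hB]
        simp only [hz, if_true, reduceIte]
        rw [padRowA_eq k (k - cs.length) ([] ++ cs.map mk1) (by simp) (by simp; omega)]
        simp [hmodeq, hnil]

-- ===== VERDICT (by name: the statement is the Claim_ definition above) =====
theorem makeMatrixx_spec : Claim_equal_makeMatrixx := by
  intro plainText key _hdom hpre
  unfold Spec_makeMatrixx
  have hk : 0 < key.toList.length := by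
    cases hlist : key.toList with
    | nil =>
        exact absurd (by have := congrArg String.ofList hlist; simpa using this) hpre
    | cons a l => simp
  have hkI : (0 : Int) < (key.toList.length : Int) := by exact_mod_cast hk
  simp only [makeMatrixx, makeMatrixx_alt]
  rw [foldA' key hk]
  simp only [PySem.Str.len_eq]
  rw [B_matrix key.toList.length hk ((PySem.Str.replace plainText " " "").toList)]
  have hcond : PySem.Int.mod (((PySem.Str.replace plainText " " "").toList.length : Int))
      ((key.toList.length : Int))
      = (((PySem.Str.replace plainText " " "").toList.length % key.toList.length : Nat) : Int) := by
    rw [PySem.Int.mod_eq_emod_of_pos hkI]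
    exact (Int.natCast_mod _ _).symm
  simp only [hcond]
  have hrep : ((key.toList.length : Int)
      - (((PySem.Str.replace plainText " " "").toList.length % key.toList.length : Nat) : Int)).toNat
      = key.toList.length - (PySem.Str.replace plainText " " "").toList.length % key.toList.length := by
    omega
  have htn : ((key.toList.length : Nat) : Int).toNat = key.toList.length := by omega
  simp only [hrep, htn, ne_eq, Int.natCast_eq_zero, List.nil_append]
  exact assemble key.toList.length hk (PySem.Str.replace plainText " " "").toList.length
    (PySem.Str.replace plainText " " "").toList rfl
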